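-- pv_equiv track=rewrite | github.com/JendaTomas/projekt_3 | projekt_3.py | parsering_html_results
-- ===== SOURCE A (Python) =====
-- def parsering_html_results(municipalite, political_parties, numbers_votes_parties):
--     """
--     adds votes to parties by municipality
--     """
--     number_municipalities = len(municipalite)
--     number_parties = len(political_parties)
--     votes_party = list(list()for _ in range(number_parties))
--     index_municipality = 0
--     index_party = 0
--     for list_party in range(number_parties):
--         for _ in range(number_municipalities):
--             votes_party[list_party].append(numbers_votes_parties[(index_party*number_parties)+index_municipality])
--             index_party += 1
--         index_municipality += 1
--         index_party = 0
--     return votes_party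
-- ===== SOURCE B (Python) =====
-- def parsering_html_results(municipalite, political_parties, numbers_votes_parties):
--     """
--     adds votes to parties by municipality
--     """
--     number_municipalities = len(municipalite)
--     number_parties = len(political_parties)
--     votes_party = [[] for _ in range(number_parties)]
--     for k in range(number_municipalities * number_parties):
--         votes_party[k % number_parties].append(numbers_votes_parties[k])
--     return votes_party
-- ===== Notes on version B (the rewrite author's own statement) =====
-- stated objective: simpler
-- what changed: Replaces the nested double loop with two hand-maintained counters and a computed index j*P+p by one flat sequential pass over the data that distributes element k into bucket k % P.
import Mathlib
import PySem

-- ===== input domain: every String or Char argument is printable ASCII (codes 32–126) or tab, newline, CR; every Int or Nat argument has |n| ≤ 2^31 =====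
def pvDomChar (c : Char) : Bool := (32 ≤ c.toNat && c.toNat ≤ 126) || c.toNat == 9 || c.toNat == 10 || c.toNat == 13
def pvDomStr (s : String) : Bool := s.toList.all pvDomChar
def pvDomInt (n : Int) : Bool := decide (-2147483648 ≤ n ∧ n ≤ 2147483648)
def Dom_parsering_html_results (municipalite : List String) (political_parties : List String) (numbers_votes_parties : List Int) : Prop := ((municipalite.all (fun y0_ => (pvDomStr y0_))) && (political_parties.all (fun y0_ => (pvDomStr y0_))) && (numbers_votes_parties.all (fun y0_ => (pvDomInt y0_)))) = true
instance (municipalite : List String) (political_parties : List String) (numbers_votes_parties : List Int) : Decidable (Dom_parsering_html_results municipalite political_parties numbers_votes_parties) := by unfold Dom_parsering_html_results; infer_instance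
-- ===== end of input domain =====

-- B replaces A's nested double loop with counters and computed index j*P+p by one flat
-- sequential pass distributing element k into party bucket k % P (objective: simpler).

-- ===== PORT A =====
-- state of the nested loops: (votes_party, index_municipality) outside, (votes_party, index_party) inside
def parsering_html_results (municipalite : List String) (political_parties : List String) (numbers_votes_parties : List Int) : List (List Int) :=
  let number_municipalities := municipalite.length
  let number_parties := political_parties.length
  let final :=
    (List.range number_parties).foldl
      (fun (st : List (List Int) × Nat) list_party =>
        let inner :=
          (List.range number_municipalities).foldl
            (fun (s : List (List Int) × Nat) _ =>
              (s.1.set list_party (s.1[list_party]! ++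
                 [PySem.List.pyGetD numbers_votes_parties ((s.2 * number_parties + st.2 : Nat) : Int) 0]),
               s.2 + 1))
            (st.1, 0)
        (inner.1, st.2 + 1))
      (List.replicate number_parties ([] : List Int), 0)
  final.1

-- ===== PORT B =====
def parsering_html_results_alt (municipalite : List String) (political_parties : List String) (numbers_votes_parties : List Int) : List (List Int) :=
  let number_municipalities := municipalite.length
  let number_parties := political_parties.length
  (List.range (number_municipalities * number_parties)).foldl
    (fun (vp : List (List Int)) k =>
      vp.set (k % number_parties) (vp[k % number_parties]! ++
        [PySem.List.pyGetD numbers_votes_parties ((k : Nat) : Int) 0]))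
    (List.replicate number_parties ([] : List Int))

-- ===== PRECONDITION & SPEC =====
-- Pre_ excludes exactly the inputs where Python A raises IndexError (fewer vote entries
-- than municipalities*parties); Python B raises IndexError on exactly those inputs too.
def Pre_parsering_html_results (municipalite : List String) (political_parties : List String) (numbers_votes_parties : List Int) : Prop :=
  municipalite.length * political_parties.length ≤ numbers_votes_parties.length
instance (municipalite : List String) (political_parties : List String) (numbers_votes_parties : List Int) : Decidable (Pre_parsering_html_results municipalite political_parties numbers_votes_parties) := by unfold Pre_parsering_html_results; infer_instance
def pvWitness_parsering_html_results : List String × List String × List Int := (["a", "b"], ["x", "y", "z"], [1, 2, 3, 4, 5, 6])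
def Spec_parsering_html_results (municipalite : List String) (political_parties : List String) (numbers_votes_parties : List Int) (out : List (List Int)) : Prop := out = parsering_html_results_alt municipalite political_parties numbers_votes_parties
instance (municipalite : List String) (political_parties : List String) (numbers_votes_parties : List Int) (out : List (List Int)) : Decidable (Spec_parsering_html_results municipalite political_parties numbers_votes_parties out) := by unfold Spec_parsering_html_results; infer_instance

-- ===== CLAIM (what is proved, stated in full; the proofs are below) =====
def Claim_equal_parsering_html_results : Prop := ∀ (municipalite : List String) (political_parties : List String) (numbers_votes_parties : List Int), Dom_parsering_html_results municipalite political_parties numbers_votes_parties → Pre_parsering_html_results municipalite political_parties numbers_votes_parties → Spec_parsering_html_results municipalite political_parties numbers_votes_parties (parsering_html_results municipalite political_parties numbers_votes_parties)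

-- ===== LEMMAS AND PROOFS =====

theorem pv_getElem_bang_set {A : Type} [Inhabited A] (l : List A) (p : Nat) (x : A) (h : p < l.length) :
    (l.set p x)[p]! = x := by
  rw [List.getElem!_eq_getElem?_getD, List.getElem?_set_self (by simpa using h)]
  rfl

theorem pv_getElem_bang_map_range {A : Type} [Inhabited A] (f : Nat → A) {m P : Nat} (h : m < P) :
    ((List.range P).map f)[m]! = f m := by
  rw [List.getElem!_eq_getElem?_getD, List.getElem?_eq_getElem (by simpa using h)]
  simp

-- A's inner loop: starting from (vp, 0) with bucket p, it appends the M values g (j*P+p)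
-- to bucket p and leaves the counter at M.
theorem pv_inner_fold (g : Nat → Int) (P p : Nat) :
    ∀ (M : Nat) (vp : List (List Int)) (ip : Nat),
    (List.range M).foldl
      (fun (s : List (List Int) × Nat) _ =>
        (s.1.set p (s.1[p]! ++ [g (s.2 * P + p)]), s.2 + 1)) (vp, ip)
    = (vp.set p (vp[p]! ++ ((List.range M).map (fun j => g ((ip + j) * P + p)))), ip + M) := by
  intro M
  induction M with
  | zero =>
    intro vp ip
    simp only [List.range_zero, List.foldl_nil, List.map_nil, List.append_nil, Nat.add_zero]
    refine Prod.ext ?_ rfl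
    by_cases hp : p < vp.length
    · rw [List.getElem!_eq_getElem?_getD, List.getElem?_eq_getElem hp]
      simp
    · rw [List.set_eq_of_length_le (by omega)]
  | succ m ih =>
    intro vp ip
    rw [List.range_succ, List.foldl_append, ih]
    simp only [List.foldl_cons, List.foldl_nil, List.map_append, List.map_cons,
      List.map_nil]
    refine Prod.ext ?_ (by simp; omega)
    simp only
    by_cases hp : p < vp.length
    · rw [pv_getElem_bang_set _ _ _ hp, List.set_set]
      simp [List.append_assoc]
    · simp only [List.set_eq_of_length_le (Nat.le_of_not_lt hp)]

-- the state after A's outer loop over range n (n ≤ P): bucket p holds its row iff p < n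
theorem pv_outer_fold (g : Nat → Int) (P M : Nat) :
    ∀ (n : Nat), n ≤ P →
    (List.range n).foldl
      (fun (st : List (List Int) × Nat) list_party =>
        let inner :=
          (List.range M).foldl
            (fun (s : List (List Int) × Nat) _ =>
              (s.1.set list_party (s.1[list_party]! ++ [g (s.2 * P + st.2)]), s.2 + 1))
            (st.1, 0)
        (inner.1, st.2 + 1))
      (List.replicate P ([] : List Int), 0)
    = ((List.range P).map
         (fun p => if p < n then (List.range M).map (fun j => g (j * P + p)) else []), n) := by
  intro n
  induction n with
  | zero =>
    intro _
    refine Prod.ext ?_ rfl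
    refine List.ext_getElem (by simp) ?_
    intro i h1 h2
    simp [List.getElem_replicate]
  | succ m ih =>
    intro hle
    rw [List.range_succ, List.foldl_append, ih (by omega)]
    simp only [List.foldl_cons, List.foldl_nil]
    rw [pv_inner_fold]
    refine Prod.ext ?_ rfl
    simp only
    refine List.ext_getElem (by simp) ?_
    intro i h1 h2
    simp only [List.length_set, List.length_map, List.length_range] at h1
    rw [List.getElem_set]
    by_cases hi : m = i
    · subst hi
      rw [if_pos rfl, pv_getElem_bang_map_range _ (by omega)]
      simp only [List.getElem_map, List.getElem_range]
      simp
    · rw [if_neg hi]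
      simp only [List.getElem_map, List.getElem_range]
      by_cases h : i < m
      · rw [if_pos h, if_pos (by omega)]
      · rw [if_neg h, if_neg (by omega)]

-- B's pass over one chunk [m*P, m*P+P): processing its first n elements appends
-- g (m*P+r) to bucket r for each r < n.
theorem pv_chunk_fold (g : Nat → Int) (P m : Nat) :
    ∀ (n : Nat), n ≤ P →
    ((List.range n).map (fun r => m * P + r)).foldl
      (fun (vp : List (List Int)) k =>
        vp.set (k % P) (vp[k % P]! ++ [g k]))
      ((List.range P).map (fun p => (List.range m).map (fun j => g (j * P + p))))
    = (List.range P).map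
        (fun p => if p < n then (List.range m).map (fun j => g (j * P + p)) ++ [g (m * P + p)]
                  else (List.range m).map (fun j => g (j * P + p))) := by
  intro n
  induction n with
  | zero =>
    intro _
    simp
  | succ r ih =>
    intro hle
    rw [List.range_succ, List.map_append, List.foldl_append, ih (by omega)]
    simp only [List.map_cons, List.map_nil, List.foldl_cons, List.foldl_nil]
    have hmod : (m * P + r) % P = r := by
      have h : m * P + r = r + P * m := by ring
      rw [h, Nat.add_mul_mod_self_left]
      exact Nat.mod_eq_of_lt (by omega)
    rw [hmod]
    refine List.ext_getElem (by simp) ?_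
    intro i h1 h2
    simp only [List.length_set, List.length_map, List.length_range] at h1
    rw [List.getElem_set]
    by_cases hi : r = i
    · subst hi
      rw [if_pos rfl, pv_getElem_bang_map_range _ (by omega)]
      simp only [List.getElem_map, List.getElem_range]
      simp
    · rw [if_neg hi]
      simp only [List.getElem_map, List.getElem_range]
      by_cases h : i < r
      · rw [if_pos h, if_pos (by omega)]
      · rw [if_neg h, if_neg (by omega)]

-- B's whole pass over range (M*P): bucket p ends as the row [g (j*P+p) | j < M].
theorem pv_flat_fold (g : Nat → Int) (P : Nat) :
    ∀ (M : Nat),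
    (List.range (M * P)).foldl
      (fun (vp : List (List Int)) k =>
        vp.set (k % P) (vp[k % P]! ++ [g k]))
      (List.replicate P ([] : List Int))
    = (List.range P).map (fun p => (List.range M).map (fun j => g (j * P + p))) := by
  intro M
  induction M with
  | zero =>
    refine List.ext_getElem (by simp) ?_
    intro i h1 h2
    simp
  | succ m ih =>
    have hsplit : (m + 1) * P = m * P + P := by ring
    rw [hsplit, List.range_add, List.foldl_append, ih]
    rw [pv_chunk_fold g P m P (le_refl P)]
    refine List.ext_getElem (by simp) ?_
    intro i h1 h2
    simp only [List.length_map, List.length_range] at h1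
    simp only [List.getElem_map, List.getElem_range, if_pos h1]
    rw [List.range_succ, List.map_append]
    simp

-- ===== VERDICT (by name: the statement is the Claim_ definition above) =====
theorem parsering_html_results_spec : Claim_equal_parsering_html_results := by
  intro municipalite political_parties numbers_votes_parties _ _
  unfold Spec_parsering_html_results parsering_html_results parsering_html_results_alt
  simp only
  rw [pv_outer_fold (fun i => PySem.List.pyGetD numbers_votes_parties (i : Int) 0)
        political_parties.length municipalite.length political_parties.length (le_refl _),
      pv_flat_fold (fun i => PySem.List.pyGetD numbers_votes_parties (i : Int) 0)
        political_parties.length municipalite.length]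
  simp only
  refine List.ext_getElem (by simp) ?_
  intro i h1 h2
  simp only [List.length_map, List.length_range] at h1
  simp [h1]
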